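-- pv_equiv track=rewrite | github.com/MahyarFardin/cs559_code_completion | create_completion_datasets.py | split_into_lines
-- ===== SOURCE A (Python) =====
-- from typing import List, Tuple
--
-- def split_into_lines(tokens: List[str]) -> List[List[str]]:
--     """Split token sequence into lines based on <EOL> markers."""
--     lines = []
--     current_line = []
--
--     for token in tokens:
--         if token == "<EOL>":
--             if current_line:  # Only add non-empty lines
--                 lines.append(current_line)
--                 current_line = []
--         else:
--             current_line.append(token)
--
--     # Add last line if exists
--     if current_line:
--         lines.append(current_line)
--
--     return lines
-- ===== SOURCE B (Python) =====
-- from itertools import groupby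
-- from typing import List
--
-- def split_into_lines(tokens: List[str]) -> List[List[str]]:
--     """Split token sequence into lines based on <EOL> markers."""
--     return [list(g) for is_eol, g in groupby(tokens, key=lambda t: t == "<EOL>")
--             if not is_eol]
-- ===== Notes on version B (the rewrite author's own statement) =====
-- stated objective: idiomatic
-- what changed: Replaces A's stateful loop with accumulators by itertools.groupby on the is-EOL key, keeping the non-EOL runs; empty-line dropping falls out since runs are non-empty.
import Mathlib
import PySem

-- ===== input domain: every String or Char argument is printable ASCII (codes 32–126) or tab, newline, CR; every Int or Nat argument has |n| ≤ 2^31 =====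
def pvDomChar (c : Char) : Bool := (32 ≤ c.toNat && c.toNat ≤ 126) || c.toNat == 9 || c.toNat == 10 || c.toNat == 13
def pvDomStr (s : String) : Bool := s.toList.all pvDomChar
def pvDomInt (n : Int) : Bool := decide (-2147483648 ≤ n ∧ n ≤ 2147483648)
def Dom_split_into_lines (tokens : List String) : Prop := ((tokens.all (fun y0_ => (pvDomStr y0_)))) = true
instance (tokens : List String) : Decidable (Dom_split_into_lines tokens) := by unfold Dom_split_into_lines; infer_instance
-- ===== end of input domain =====

-- B replaces A's stateful accumulator loop with a run-splitting (groupby) decomposition; objective: idiomatic.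

-- ===== PORT A =====
-- A's loop: state (lines, current_line); on "<EOL>" flush current_line if non-empty, else append token.
def split_into_lines (tokens : List String) : List (List String) :=
  let s := tokens.foldl
    (fun (s : List (List String) × List String) token =>
      if token == "<EOL>" then
        if s.2 ≠ [] then (s.1 ++ [s.2], []) else s
      else (s.1, s.2 ++ [token]))
    ([], [])
  if s.2 ≠ [] then s.1 ++ [s.2] else s.1

-- ===== PORT B =====
-- Source B groups the sequence into maximal runs of equal is-EOL key (itertools.groupby) and keeps
-- the non-EOL runs: here each step takes a whole run (takeWhile/dropWhile) at once.
def split_into_lines_alt (tokens : List String) : List (List String) :=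
  match tokens with
  | [] => []
  | t :: ts =>
    if t == "<EOL>" then
      split_into_lines_alt (ts.dropWhile (fun x => x == "<EOL>"))
    else
      (t :: ts.takeWhile (fun x => ¬ x == "<EOL>")) ::
        split_into_lines_alt (ts.dropWhile (fun x => ¬ x == "<EOL>"))
termination_by tokens.length
decreasing_by
  · exact Nat.lt_succ_of_le (List.length_dropWhile_le _ _)
  · exact Nat.lt_succ_of_le (List.length_dropWhile_le _ _)

-- ===== PRECONDITION & SPEC =====
def Spec_split_into_lines (tokens : List String) (out : List (List String)) : Prop := out = split_into_lines_alt tokens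
instance (tokens : List String) (out : List (List String)) : Decidable (Spec_split_into_lines tokens out) := by unfold Spec_split_into_lines; infer_instance

-- ===== CLAIM (what is proved, stated in full; the proofs are below) =====
def Claim_equal_split_into_lines : Prop := ∀ (tokens : List String), Dom_split_into_lines tokens → Spec_split_into_lines tokens (split_into_lines tokens)

-- ===== LEMMAS AND PROOFS =====

-- A's step function, named for the proofs.
def pvStepA (s : List (List String) × List String) (token : String) :
    List (List String) × List String :=
  if token == "<EOL>" then
    if s.2 ≠ [] then (s.1 ++ [s.2], []) else s
  else (s.1, s.2 ++ [token])

-- A's loop result relative to a pending current line `cur`.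
def pvRunA (cur : List String) : List String → List (List String)
  | [] => if cur ≠ [] then [cur] else []
  | t :: ts =>
    if t == "<EOL>" then
      if cur ≠ [] then cur :: pvRunA [] ts else pvRunA [] ts
    else pvRunA (cur ++ [t]) ts

lemma pvFoldA_eq (ts : List String) : ∀ (lines : List (List String)) (cur : List String),
    (let s := ts.foldl pvStepA (lines, cur); if s.2 ≠ [] then s.1 ++ [s.2] else s.1)
      = lines ++ pvRunA cur ts := by
  induction ts with
  | nil =>
    intro lines cur
    simp only [List.foldl_nil, pvRunA]
    by_cases h : cur = [] <;> simp [h]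
  | cons t ts ih =>
    intro lines cur
    simp only [List.foldl_cons, pvRunA, pvStepA]
    by_cases hE : (t == "<EOL>") = true
    · by_cases hc : cur = []
      · simp [hE, hc, ih]
      · simp [hE, hc, ih, List.append_assoc]
    · simp [hE, ih]

lemma pvAlt_dropEOL (ts : List String) :
    split_into_lines_alt (ts.dropWhile (fun x => x == "<EOL>")) = split_into_lines_alt ts := by
  cases ts with
  | nil => rfl
  | cons t ts =>
    by_cases hE : (t == "<EOL>") = true
    · rw [List.dropWhile_cons]
      simp only [hE, if_true]
      conv_rhs => rw [split_into_lines_alt]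
      simp [hE]
    · rw [List.dropWhile_cons]
      simp [hE]

lemma pvRunA_eq (ts : List String) : ∀ (cur : List String),
    pvRunA cur ts =
      if cur ≠ [] then
        (cur ++ ts.takeWhile (fun x => ¬ x == "<EOL>")) ::
          split_into_lines_alt (ts.dropWhile (fun x => ¬ x == "<EOL>"))
      else split_into_lines_alt ts := by
  induction ts with
  | nil =>
    intro cur
    by_cases hc : cur = [] <;> simp [pvRunA, split_into_lines_alt, hc]
  | cons t ts ih =>
    intro cur
    by_cases hE : (t == "<EOL>") = true
    · have htE : t = "<EOL>" := eq_of_beq hE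
      by_cases hc : cur = []
      · simp [pvRunA, hc, ih, split_into_lines_alt, htE, pvAlt_dropEOL]
      · simp [pvRunA, hc, ih, split_into_lines_alt, htE, pvAlt_dropEOL]
    · have htE : ¬ t = "<EOL>" := by simpa using hE
      by_cases hc : cur = []
      · simp [pvRunA, htE, hc, ih, split_into_lines_alt]
      · simp [pvRunA, htE, hc, ih]

-- ===== VERDICT (by name: the statement is the Claim_ definition above) =====
theorem split_into_lines_spec : Claim_equal_split_into_lines := by
  intro tokens _
  show split_into_lines tokens = split_into_lines_alt tokens
  have e : split_into_lines tokens =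
      (let s := tokens.foldl pvStepA ([], []);
       if s.2 ≠ [] then s.1 ++ [s.2] else s.1) := rfl
  rw [e]
  have h := pvFoldA_eq tokens [] []
  rw [pvRunA_eq] at h
  simpa using h
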